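-- pv_equiv track=rewrite | github.com/SCPrime/PaiiD | scripts/final-polish-optimizer.py | _optimize_react_content
-- ===== SOURCE A (Python) =====
-- def _optimize_react_content(content: str) -> str:
--     """Optimize React component content"""
--     lines = content.split('\n')
--     optimized_lines = []
--
--     for line in lines:
--         # Remove trailing whitespace
--         line = line.rstrip()
--
--         # Optimize imports
--         if line.strip().startswith('import '):
--             # Remove unused imports (basic detection)
--             if 'unused' not in line.lower():
--                 optimized_lines.append(line)
--             continue
--
--         # Remove empty lines at end of blocks
--         if line.strip() == "" and optimized_lines and optimized_lines[-1].strip() == "":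
--             continue
--
--         optimized_lines.append(line)
--
--     return '\n'.join(optimized_lines)
-- ===== SOURCE B (Python) =====
-- def _optimize_react_content(content: str) -> str:
--     """Optimize React component content"""
--     # pass 1: normalize (rstrip) and drop unused imports
--     kept = [
--         line
--         for line in (raw.rstrip() for raw in content.split('\n'))
--         if not (line.strip().startswith('import ') and 'unused' in line.lower())
--     ]
--     # pass 2: collapse each run of blank lines to its first line
--     out = []
--     i, n = 0, len(kept)
--     while i < n:
--         out.append(kept[i])
--         if kept[i].strip() == '':
--             while i < n and kept[i].strip() == '':
--                 i += 1
--         else: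
--             i += 1
--     return '\n'.join(out)
-- ===== Notes on version B (the rewrite author's own statement) =====
-- stated objective: alternative
-- what changed: A's single stateful loop (which consults the last appended line to decide whether to keep a blank) is re-decomposed into two passes: a filter/normalize comprehension that rstrips lines and drops unused imports, followed by an index-based run-skipping scan that collapses each run of blank lines to one line.
import Mathlib
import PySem

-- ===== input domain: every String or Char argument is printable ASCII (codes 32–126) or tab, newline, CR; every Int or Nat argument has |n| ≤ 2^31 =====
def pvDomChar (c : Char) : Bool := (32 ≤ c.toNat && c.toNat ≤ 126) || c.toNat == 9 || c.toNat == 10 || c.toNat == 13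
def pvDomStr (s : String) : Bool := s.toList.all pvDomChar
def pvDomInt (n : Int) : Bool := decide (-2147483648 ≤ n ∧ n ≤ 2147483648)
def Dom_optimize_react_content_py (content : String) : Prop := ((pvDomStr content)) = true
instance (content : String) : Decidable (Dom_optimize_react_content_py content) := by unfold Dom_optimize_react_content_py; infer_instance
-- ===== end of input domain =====

-- B re-decomposes A's single stateful loop into two passes: a filter/normalize comprehension
-- dropping unused imports, then an index-style run-skipping collapse of blank runs (objective: alternative).


-- ===== PORT A =====
-- loop body of A, step for step; acc[-1] is guarded by `!acc.isEmpty`, so the `getD ""` default is never used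
def pvStepA (acc : List String) (line : String) : List String :=
  let line := PySem.Str.rstrip line
  if PySem.Str.startswith (PySem.Str.strip line) "import " then
    if !(PySem.Str.isIn "unused" (PySem.Str.lower line)) then acc ++ [line] else acc
  else if (PySem.Str.strip line == "") && !acc.isEmpty
          && (PySem.Str.strip (PySem.List.pyGetD acc (-1) "") == "") then acc
  else acc ++ [line]

def optimize_react_content_py (content : String) : String :=
  let lines := (PySem.Str.split? content "\n").getD []
  let optimized_lines := lines.foldl pvStepA []
  PySem.Str.join "\n" optimized_lines

-- ===== PORT B =====
def pvBlank (line : String) : Bool := PySem.Str.strip line == ""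

def pvKeep (line : String) : Bool :=
  !(PySem.Str.startswith (PySem.Str.strip line) "import "
    && PySem.Str.isIn "unused" (PySem.Str.lower line))

-- B's second pass: the index-based while loop, as recursion on the remaining suffix
def pvCollapse (xs : List String) : List String :=
  match xs with
  | [] => []
  | x :: rest =>
    if pvBlank x then x :: pvCollapse (rest.dropWhile pvBlank)
    else x :: pvCollapse rest
termination_by xs.length
decreasing_by
  · simp only [List.length_cons]
    exact Nat.lt_succ_of_le (List.length_dropWhile_le _ _)
  · simp

def optimize_react_content_py_alt (content : String) : String :=
  let kept := (((PySem.Str.split? content "\n").getD []).map PySem.Str.rstrip).filter pvKeep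
  PySem.Str.join "\n" (pvCollapse kept)

-- ===== PRECONDITION & SPEC =====
def Spec_optimize_react_content_py (content : String) (out : String) : Prop := out = optimize_react_content_py_alt content
instance (content : String) (out : String) : Decidable (Spec_optimize_react_content_py content out) := by unfold Spec_optimize_react_content_py; infer_instance

-- ===== CLAIM (what is proved, stated in full; the proofs are below) =====
def Claim_equal_optimize_react_content_py : Prop := ∀ (content : String), Dom_optimize_react_content_py content → Spec_optimize_react_content_py content (optimize_react_content_py content)

-- ===== LEMMAS AND PROOFS =====

-- A's step restricted to lines that survive the import filter
def pvStepK (acc : List String) (r : String) : List String :=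
  if pvBlank r && !acc.isEmpty && pvBlank (PySem.List.pyGetD acc (-1) "") then acc
  else acc ++ [r]

lemma pvImport_nonblank (r : String)
    (h : PySem.Str.startswith (PySem.Str.strip r) "import " = true) :
    (PySem.Str.strip r == "") = false := by
  cases hr : (PySem.Str.strip r == "") with
  | false => rfl
  | true =>
    exfalso
    rw [beq_iff_eq] at hr
    rw [hr] at h
    exact absurd h (by decide)

lemma pvStepA_eq (acc : List String) (x : String) :
    pvStepA acc x = if pvKeep (PySem.Str.rstrip x) then pvStepK acc (PySem.Str.rstrip x) else acc := by
  unfold pvStepA pvStepK pvKeep pvBlank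
  cases h : PySem.Str.startswith (PySem.Str.strip (PySem.Str.rstrip x)) "import " with
  | true =>
    have hb := pvImport_nonblank (PySem.Str.rstrip x) h
    cases hu : PySem.Str.isIn "unused" (PySem.Str.lower (PySem.Str.rstrip x)) with
    | true => simp only [h, hu, hb]; simp
    | false => simp only [h, hu, hb]; simp
  | false => simp only [h]; simp

lemma pvFoldl_stepA (lines : List String) : ∀ acc : List String,
    lines.foldl pvStepA acc = ((lines.map PySem.Str.rstrip).filter pvKeep).foldl pvStepK acc := by
  induction lines with
  | nil =>
    intro acc
    simp only [List.foldl_nil, List.map_nil, List.filter_nil]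
  | cons x rest ih =>
    intro acc
    rw [List.foldl_cons, pvStepA_eq, List.map_cons, List.filter_cons]
    cases hk : pvKeep (PySem.Str.rstrip x) with
    | true =>
      simp only [reduceIte, List.foldl_cons]
      exact ih _
    | false =>
      simp only [Bool.false_eq_true, if_false]
      exact ih _

lemma pvBlank_last_append (acc : List String) (x : String) :
    pvBlank (PySem.List.pyGetD (acc ++ [x]) (-1) "") = pvBlank x := by
  rw [PySem.List.pyGetD_neg_one_append_singleton]

lemma pvHead_dropWhile {α : Type} {p : α → Bool} :
    ∀ (l : List α) (y : α), (l.dropWhile p).head? = some y → p y = false := by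
  intro l
  induction l with
  | nil => intro y h; simp at h
  | cons a l ih =>
    intro y h
    cases ha : p a with
    | true =>
      rw [List.dropWhile_cons_of_pos ha] at h
      exact ih y h
    | false =>
      rw [List.dropWhile_cons_of_neg (by simp [ha])] at h
      simp only [List.head?_cons, Option.some.injEq] at h
      subst h
      exact ha

lemma pvCollapse_cons_blank (x : String) (rest : List String) (hx : pvBlank x = true) :
    pvCollapse (x :: rest) = x :: pvCollapse (rest.dropWhile pvBlank) := by
  rw [pvCollapse]; simp [hx]

lemma pvCollapse_cons_nonblank (x : String) (rest : List String) (hx : pvBlank x = false) :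
    pvCollapse (x :: rest) = x :: pvCollapse rest := by
  rw [pvCollapse]; simp [hx]

lemma pvFoldl_dropWhile : ∀ (xs acc : List String), acc ≠ [] →
    pvBlank (PySem.List.pyGetD acc (-1) "") = true →
    xs.foldl pvStepK acc = (xs.dropWhile pvBlank).foldl pvStepK acc := by
  intro xs
  induction xs with
  | nil => intro acc _ _; rfl
  | cons x rest ih =>
    intro acc hne hb
    cases hx : pvBlank x with
    | true =>
      rw [List.dropWhile_cons_of_pos hx, List.foldl_cons]
      have hstep : pvStepK acc x = acc := by
        unfold pvStepK
        simp [hx, hb, hne]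
      rw [hstep]
      exact ih acc hne hb
    | false =>
      rw [List.dropWhile_cons_of_neg (by simp [hx])]

lemma pvFoldl_collapse : ∀ (n : Nat) (xs acc : List String), xs.length ≤ n →
    (acc = [] ∨ pvBlank (PySem.List.pyGetD acc (-1) "") = false
      ∨ (∀ y, xs.head? = some y → pvBlank y = false)) →
    xs.foldl pvStepK acc = acc ++ pvCollapse xs := by
  intro n
  induction n with
  | zero =>
    intro xs acc hlen _
    have hx : xs = [] := List.eq_nil_of_length_eq_zero (Nat.le_zero.mp hlen)
    subst hx
    rw [pvCollapse]
    simp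
  | succ n ih =>
    intro xs acc hlen h
    match xs with
    | [] =>
      rw [pvCollapse]; simp
    | x :: rest =>
      cases hx : pvBlank x with
      | true =>
        have hacc : acc = [] ∨ pvBlank (PySem.List.pyGetD acc (-1) "") = false := by
          rcases h with h | h | h
          · exact Or.inl h
          · exact Or.inr h
          · exact absurd (h x rfl) (by simp [hx])
        have hstep : pvStepK acc x = acc ++ [x] := by
          unfold pvStepK
          rcases hacc with h' | h' <;> simp [h', hx]
        rw [List.foldl_cons, hstep]
        rw [pvFoldl_dropWhile rest (acc ++ [x]) (by simp)
              (by rw [pvBlank_last_append]; exact hx)]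
        rw [ih (rest.dropWhile pvBlank) (acc ++ [x])
              (le_trans (List.length_dropWhile_le _ _) (by simpa using hlen))
              (Or.inr (Or.inr (fun y hy => pvHead_dropWhile _ _ hy)))]
        rw [pvCollapse_cons_blank x rest hx]
        simp
      | false =>
        have hstep : pvStepK acc x = acc ++ [x] := by
          unfold pvStepK; simp [hx]
        rw [List.foldl_cons, hstep]
        rw [ih rest (acc ++ [x]) (by simpa using hlen)
              (Or.inr (Or.inl (by rw [pvBlank_last_append]; exact hx)))]
        rw [pvCollapse_cons_nonblank x rest hx]
        simp

-- ===== VERDICT (by name: the statement is the Claim_ definition above) =====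
theorem optimize_react_content_py_spec : Claim_equal_optimize_react_content_py := by
  intro content _
  unfold Spec_optimize_react_content_py optimize_react_content_py optimize_react_content_py_alt
  dsimp only
  rw [pvFoldl_stepA, pvFoldl_collapse _ _ [] le_rfl (Or.inl rfl), List.nil_append]
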